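-- pv_equiv track=rewrite | github.com/OranJayuice/python_practice_upload_selftaught | L-System.py | path_split
-- ===== SOURCE A (Python) =====
-- def path_split(path):
--     i = 0
--     lst = []
--     while i < len(path):
--         if path[i] == "F":
--             lst.append(path[i:i+2])
--             i += 2
--         else:
--             lst.append(path[i])
--             i += 1
--     return lst
-- ===== SOURCE B (Python) =====
-- import re
--
-- # One regex tokenization pass: an 'F' grabs an optional following character
-- # (any character, including newline), otherwise any single character matches.
-- _TOKEN = re.compile(r'F[\s\S]?|[\s\S]')
--
-- def path_split(path):
--     return _TOKEN.findall(path)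
-- ===== Notes on version B (the rewrite author's own statement) =====
-- stated objective: idiomatic
-- what changed: Replaced the manual index-walking while-loop with slicing by a single compiled-regex tokenization: re.findall(r'F[\s\S]?|[\s\S]', path) pairs each 'F' with an optional following character and otherwise emits single characters, delegating the traversal to the regex engine.
import Mathlib
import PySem

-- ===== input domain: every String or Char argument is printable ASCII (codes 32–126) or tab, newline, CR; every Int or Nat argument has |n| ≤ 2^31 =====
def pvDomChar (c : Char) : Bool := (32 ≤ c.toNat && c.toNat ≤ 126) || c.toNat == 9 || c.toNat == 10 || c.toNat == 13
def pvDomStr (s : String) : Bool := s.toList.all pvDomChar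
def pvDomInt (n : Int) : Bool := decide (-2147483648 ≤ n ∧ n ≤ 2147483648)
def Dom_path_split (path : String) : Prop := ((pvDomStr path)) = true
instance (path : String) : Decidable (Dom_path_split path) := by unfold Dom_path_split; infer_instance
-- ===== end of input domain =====

-- B replaces A's index-walking while-loop (with slicing) by one regex tokenization,
-- re.findall(r'F[\s\S]?|[\s\S]', path) — idiomatic; same result proved equal below.

-- ===== PORT A =====
-- the while-loop of A: state is the index i and the accumulator lst;
-- path[i] with 0 ≤ i < len is exactly cs[i]; path[i:i+2] is PySem.List.slice.
def path_split_loop (cs : List Char) (i : Nat) (lst : List String) : List String :=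
  if h : i < cs.length then
    if cs[i] = 'F' then
      path_split_loop cs (i + 2) (lst ++ [String.ofList (PySem.List.slice cs (some (i : Int)) (some ((i : Int) + 2)))])
    else
      path_split_loop cs (i + 1) (lst ++ [String.ofList [cs[i]]])
  else
    lst
termination_by cs.length - i

def path_split (path : String) : List String := path_split_loop path.toList 0 []

-- ===== PORT B =====
-- Hand port of re.findall with the fixed pattern r'F[\s\S]?|[\s\S]' (PySem has no
-- regex engine): findall scans left to right taking non-overlapping leftmost matches,
-- trying the alternatives in order — 'F' with a greedy optional any-character first,
-- else any single character. This transcription is exact for this pattern: every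
-- match is non-empty, so the scan consumes the whole string with no empty matches.
def path_split_alt_go : List Char → List String
  | [] => []
  | c :: rest =>
    if c = 'F' then
      match rest with
      | d :: rest' => String.ofList [c, d] :: path_split_alt_go rest'  -- 'F' + optional char taken (greedy)
      | [] => [String.ofList [c]]                                      -- 'F' at end: optional part empty
    else
      String.ofList [c] :: path_split_alt_go rest                      -- second alternative: [\s\S]

def path_split_alt (path : String) : List String := path_split_alt_go path.toList

-- ===== PRECONDITION & SPEC =====
def Spec_path_split (path : String) (out : List String) : Prop := out = path_split_alt path
instance (path : String) (out : List String) : Decidable (Spec_path_split path out) := by unfold Spec_path_split; infer_instance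

-- ===== CLAIM (what is proved, stated in full; the proofs are below) =====
def Claim_equal_path_split : Prop := ∀ (path : String), Dom_path_split path → Spec_path_split path (path_split path)

-- ===== LEMMAS AND PROOFS =====

theorem alt_go_F2 (d : Char) (rest : List Char) :
    path_split_alt_go ('F' :: d :: rest) = String.ofList ['F', d] :: path_split_alt_go rest := rfl

theorem alt_go_F1 : path_split_alt_go ['F'] = [String.ofList ['F']] := rfl

theorem alt_go_cons (c : Char) (rest : List Char) (h : ¬ c = 'F') :
    path_split_alt_go (c :: rest) = String.ofList [c] :: path_split_alt_go rest := by
  rw [path_split_alt_go.eq_def]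
  simp [h]

theorem path_split_loop_eq (cs : List Char) (i : Nat) (lst : List String) :
    path_split_loop cs i lst = lst ++ path_split_alt_go (cs.drop i) := by
  induction i, lst using path_split_loop.induct cs with
  | case1 i lst h hF ih =>
    rw [path_split_loop]
    simp only [h, dif_pos, hF, if_pos]
    rw [ih]
    have hdrop : cs.drop i = cs[i] :: cs.drop (i + 1) := List.drop_eq_getElem_cons h
    have hslice : PySem.List.slice cs (some (i : Int)) (some ((i : Int) + 2)) = (cs.drop i).take 2 := by
      have := PySem.List.slice_natCast_add cs i 2
      simpa using this
    by_cases h1 : i + 1 < cs.length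
    · have hdrop1 : cs.drop (i + 1) = cs[i + 1] :: cs.drop (i + 2) := List.drop_eq_getElem_cons h1
      have hs2 : PySem.List.slice cs (some (i : Int)) (some ((i : Int) + 2)) = ['F', cs[i + 1]] := by
        rw [hslice, hdrop, hdrop1, hF]; rfl
      rw [hdrop, hdrop1, hF, alt_go_F2, hs2]
      simp
    · have hdrop1 : cs.drop (i + 1) = [] := List.drop_eq_nil_of_le (by omega)
      have hdrop2 : cs.drop (i + 2) = [] := List.drop_eq_nil_of_le (by omega)
      have hs2 : PySem.List.slice cs (some (i : Int)) (some ((i : Int) + 2)) = ['F'] := by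
        rw [hslice, hdrop, hdrop1, hF]; rfl
      rw [hdrop, hdrop1, hdrop2, hF, alt_go_F1, hs2]
      simp [path_split_alt_go]
  | case2 i lst h hF ih =>
    rw [path_split_loop]
    simp only [h, dif_pos, hF]
    rw [ih]
    have hdrop : cs.drop i = cs[i] :: cs.drop (i + 1) := List.drop_eq_getElem_cons h
    rw [hdrop, alt_go_cons _ _ hF]
    simp
  | case3 i lst h =>
    rw [path_split_loop]
    simp only [h, dif_neg, not_false_iff]
    have hd : cs.drop i = [] := List.drop_eq_nil_of_le (by omega)
    simp [hd, path_split_alt_go]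

-- ===== VERDICT (by name: the statement is the Claim_ definition above) =====
theorem path_split_spec : Claim_equal_path_split := by
  intro path _
  unfold Spec_path_split path_split path_split_alt
  simpa using path_split_loop_eq path.toList 0 []
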